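-- pv_equiv track=rewrite | github.com/tonyprc/OFA-ParaConc-FLPE | para_conc/core/wordclouding.py | zh_word_merger
-- ===== SOURCE A (Python) =====
-- from collections import Counter, defaultdict
--
-- def zh_word_merger(temp_wd):
--     final_dict = {}
--     merge_dict = defaultdict(list)
--     for key, item_list in temp_wd.items():
--         temp_dict = {}
--         for (w, t, q) in item_list:
--             if (w,t) not in temp_dict.keys():
--                 temp_dict[(w,t)] = q
--             else:
--                 temp_dict[(w,t)] += q
--         for (w,t), q in temp_dict.items():
--             merge_dict[key].append((w,t,q))
--     for key, item_list in merge_dict.items():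
--         t_q = 0
--         for (w, t, q) in item_list:
--             t_q += q
--         final_dict[(key, t_q)]=item_list
--     return final_dict
-- ===== SOURCE B (Python) =====
-- def zh_word_merger(temp_wd):
--     final_dict = {}
--     for key, items in temp_wd.items():
--         merged = []
--         for (w, t, q) in items:
--             if all((w2, t2) != (w, t) for (w2, t2, _) in merged):
--                 merged.append((w, t, sum(q2 for (w2, t2, q2) in items if (w2, t2) == (w, t))))
--         if merged:
--             final_dict[(key, sum(q for (_, _, q) in items))] = merged
--     return final_dict
-- ===== Notes on version B (the rewrite author's own statement) =====
-- stated objective: alternative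
-- what changed: B drops all hash maps: per key it builds the merged list by brute-force first-occurrence scanning (membership check against the output list built so far, plus a full rescan of the raw items to sum each pair's quantities), and takes the key's total directly as the sum of the raw quantities, so A's temp_dict, merge_dict and the separate totals loop all disappear.
import Mathlib
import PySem

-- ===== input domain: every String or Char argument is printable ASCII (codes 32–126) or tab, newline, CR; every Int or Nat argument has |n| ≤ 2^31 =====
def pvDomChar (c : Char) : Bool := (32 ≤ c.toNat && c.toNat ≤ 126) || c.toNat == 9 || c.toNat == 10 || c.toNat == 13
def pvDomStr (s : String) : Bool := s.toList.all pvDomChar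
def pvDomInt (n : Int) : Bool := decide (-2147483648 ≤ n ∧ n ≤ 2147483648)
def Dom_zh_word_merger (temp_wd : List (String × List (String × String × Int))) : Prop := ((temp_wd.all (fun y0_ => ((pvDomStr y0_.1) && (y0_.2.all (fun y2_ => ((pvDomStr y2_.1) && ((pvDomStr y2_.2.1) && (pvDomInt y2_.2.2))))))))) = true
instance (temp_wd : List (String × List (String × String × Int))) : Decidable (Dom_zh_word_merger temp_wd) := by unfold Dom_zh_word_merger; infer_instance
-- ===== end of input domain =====

-- B replaces A's three dict-based phases by per-key brute-force nested list scans
-- (first-occurrence dedup against the output list, full rescan for each pair's sum,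
-- total taken from the raw items); objective: alternative, not faster.

-- ===== PORT A =====
def zh_word_merger (temp_wd : List (String × List (String × String × Int))) : List (String × Int × List (String × String × Int)) :=
  -- merge_dict = defaultdict(list); for key, item_list in temp_wd.items(): …
  let merge_dict : PySem.Dict String (List (String × String × Int)) :=
    temp_wd.foldl (fun md kv =>
      -- temp_dict = {}; for (w,t,q) in item_list: if (w,t) not in temp_dict: temp_dict[(w,t)] = q else += q
      let temp_dict : PySem.Dict (String × String) Int :=
        kv.2.foldl (fun td x =>
          if td.contains (x.1, x.2.1) = false then td.insert (x.1, x.2.1) x.2.2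
          else td.insert (x.1, x.2.1) (td.getD (x.1, x.2.1) 0 + x.2.2)) PySem.Dict.empty
      -- for (w,t), q in temp_dict.items(): merge_dict[key].append((w,t,q))
      temp_dict.items.foldl (fun md2 p => md2.modify kv.1 [] (· ++ [(p.1.1, p.1.2, p.2)])) md)
      PySem.Dict.empty
  -- for key, item_list in merge_dict.items(): t_q = sum of q; final_dict[(key, t_q)] = item_list
  let final_dict : PySem.Dict (String × Int) (List (String × String × Int)) :=
    merge_dict.items.foldl (fun fd p =>
      let t_q : Int := p.2.foldl (fun a x => a + x.2.2) 0
      fd.insert (p.1, t_q) p.2) PySem.Dict.empty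
  final_dict.items.map (fun p => (p.1.1, p.1.2, p.2))

-- ===== PORT B =====
def zh_word_merger_alt (temp_wd : List (String × List (String × String × Int))) : List (String × Int × List (String × String × Int)) :=
  let final_dict : PySem.Dict (String × Int) (List (String × String × Int)) :=
    temp_wd.foldl (fun fd kv =>
      -- merged = []; for (w,t,q) in items: if all((w2,t2)!=(w,t) for (w2,t2,_) in merged):
      --   merged.append((w, t, sum(q2 for (w2,t2,q2) in items if (w2,t2)==(w,t))))
      let merged : List (String × String × Int) :=
        kv.2.foldl (fun m x =>
          if m.all (fun y => !((y.1, y.2.1) == (x.1, x.2.1))) then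
            m ++ [(x.1, x.2.1, kv.2.foldl (fun a y => if (y.1, y.2.1) == (x.1, x.2.1) then a + y.2.2 else a) 0)]
          else m) []
      -- if merged: final_dict[(key, sum(q for (_,_,q) in items))] = merged
      if merged.isEmpty = false then
        fd.insert (kv.1, kv.2.foldl (fun a y => a + y.2.2) 0) merged
      else fd) PySem.Dict.empty
  final_dict.items.map (fun p => (p.1.1, p.1.2, p.2))

-- ===== PRECONDITION & SPEC =====
-- Pre_ excludes association lists with duplicate keys: they represent no Python dict argument
-- (the dict collapses duplicates before zh_word_merger ever runs), so A's value there is accidental.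
def Pre_zh_word_merger (temp_wd : List (String × List (String × String × Int))) : Prop :=
  (temp_wd.map Prod.fst).Nodup
instance (temp_wd : List (String × List (String × String × Int))) : Decidable (Pre_zh_word_merger temp_wd) := by unfold Pre_zh_word_merger; infer_instance

def pvWitness_zh_word_merger : (List (String × List (String × String × Int))) :=
  [("a", [("w", "t", (1 : Int)), ("w", "t", 2)]), ("b", [])]

def Spec_zh_word_merger (temp_wd : List (String × List (String × String × Int))) (out : List (String × Int × List (String × String × Int))) : Prop := out = zh_word_merger_alt temp_wd
instance (temp_wd : List (String × List (String × String × Int))) (out : List (String × Int × List (String × String × Int))) : Decidable (Spec_zh_word_merger temp_wd out) := by unfold Spec_zh_word_merger; infer_instance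

-- ===== CLAIM (what is proved, stated in full; the proofs are below) =====
def Claim_equal_zh_word_merger : Prop := ∀ (temp_wd : List (String × List (String × String × Int))), Dom_zh_word_merger temp_wd → Pre_zh_word_merger temp_wd → Spec_zh_word_merger temp_wd (zh_word_merger temp_wd)

-- ===== LEMMAS AND PROOFS =====
abbrev pvFlat (p : (String × String) × Int) : String × String × Int := (p.1.1, p.1.2, p.2)

-- A's per-key temp_dict fold
def pvTd (l : List (String × String × Int)) : PySem.Dict (String × String) Int :=
  l.foldl (fun td x =>
    if td.contains (x.1, x.2.1) = false then td.insert (x.1, x.2.1) x.2.2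
    else td.insert (x.1, x.2.1) (td.getD (x.1, x.2.1) 0 + x.2.2)) PySem.Dict.empty

-- sum of the quantities of all occurrences of key k in l (B's inner rescan)
def pvSumK (l : List (String × String × Int)) (k : String × String) : Int :=
  l.foldl (fun a y => if (y.1, y.2.1) == k then a + y.2.2 else a) 0

-- B's per-key merged list
def pvMerged (L : List (String × String × Int)) : List (String × String × Int) :=
  L.foldl (fun m x =>
    if m.all (fun y => !((y.1, y.2.1) == (x.1, x.2.1))) then
      m ++ [(x.1, x.2.1, pvSumK L (x.1, x.2.1))]
    else m) []

def pvTotal (l : List (String × String × Int)) : Int := l.foldl (fun a x => a + x.2.2) 0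

-- first occurrences of keys of l that are not in seen, in order
def pvKN : List (String × String × Int) → List (String × String) → List (String × String)
  | [], _ => []
  | x :: xs, seen =>
      if (x.1, x.2.1) ∈ seen then pvKN xs seen
      else (x.1, x.2.1) :: pvKN xs (seen ++ [(x.1, x.2.1)])

def pvEntry (kv : String × List (String × String × Int)) : Option (String × List (String × String × Int)) :=
  if (pvTd kv.2).items.isEmpty then none else some (kv.1, (pvTd kv.2).items.map pvFlat)

def pvEntryB (kv : String × List (String × String × Int)) :
    Option ((String × Int) × List (String × String × Int)) :=
  if (pvMerged kv.2).isEmpty = false then some ((kv.1, pvTotal kv.2), pvMerged kv.2) else none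

lemma pvKN_not_mem_seen (l : List (String × String × Int)) :
    ∀ (seen : List (String × String)) (k : String × String), k ∈ pvKN l seen → k ∉ seen := by
  induction l with
  | nil => intro seen k h; exact absurd h (List.not_mem_nil)
  | cons x xs ih =>
    intro seen k h
    unfold pvKN at h
    by_cases hx : (x.1, x.2.1) ∈ seen
    · rw [if_pos hx] at h; exact ih seen k h
    · rw [if_neg hx] at h
      rcases List.mem_cons.mp h with rfl | h
      · exact hx
      · intro hk
        exact ih _ k h (List.mem_append.mpr (Or.inl hk))

lemma pvKN_nodup (l : List (String × String × Int)) :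
    ∀ (seen : List (String × String)), (pvKN l seen).Nodup := by
  induction l with
  | nil => intro seen; simp [pvKN]
  | cons x xs ih =>
    intro seen
    unfold pvKN
    by_cases hx : (x.1, x.2.1) ∈ seen
    · rw [if_pos hx]; exact ih seen
    · rw [if_neg hx]
      refine List.nodup_cons.mpr ⟨?_, ih _⟩
      intro hmem
      exact pvKN_not_mem_seen xs _ _ hmem (by simp)

lemma pvKN_covers (l : List (String × String × Int)) :
    ∀ (seen : List (String × String)) (y : String × String × Int), y ∈ l →
      (y.1, y.2.1) ∈ seen ++ pvKN l seen := by
  induction l with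
  | nil => intro seen y h; exact absurd h (List.not_mem_nil)
  | cons x xs ih =>
    intro seen y h
    unfold pvKN
    by_cases hx : (x.1, x.2.1) ∈ seen
    · rw [if_pos hx]
      rcases List.mem_cons.mp h with rfl | h
      · exact List.mem_append.mpr (Or.inl hx)
      · exact ih seen y h
    · rw [if_neg hx]
      rcases List.mem_cons.mp h with rfl | h
      · simp
      · have := ih (seen ++ [(x.1, x.2.1)]) y h
        simp only [List.mem_append, List.mem_cons] at this ⊢
        tauto

lemma pvKN_cons (x : String × String × Int) (xs : List (String × String × Int)) (seen : List (String × String)) :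
    pvKN (x :: xs) seen = if (x.1, x.2.1) ∈ seen then pvKN xs seen
      else (x.1, x.2.1) :: pvKN xs (seen ++ [(x.1, x.2.1)]) := rfl

lemma pvSumMapAdd (f g : (String × String) → Int) (ks : List (String × String)) :
    (ks.map (fun k => f k + g k)).sum = (ks.map f).sum + (ks.map g).sum := by
  induction ks with
  | nil => simp
  | cons k ks ih => simp only [List.map_cons, List.sum_cons, ih]; ring

lemma pvSumK_acc (k : String × String) (l : List (String × String × Int)) :
    ∀ (a : Int), l.foldl (fun a y => if (y.1, y.2.1) == k then a + y.2.2 else a) a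
      = a + pvSumK l k := by
  induction l with
  | nil => intro a; simp [pvSumK]
  | cons y ys ih =>
    intro a
    unfold pvSumK
    simp only [List.foldl_cons]
    by_cases h : ((y.1, y.2.1) == k) = true
    · rw [if_pos h, if_pos h, ih, ih]; ring
    · rw [if_neg h, if_neg h, ih, ih]; omega

lemma pvSumK_cons (k : String × String) (y : String × String × Int) (l : List (String × String × Int)) :
    pvSumK (y :: l) k = (if (y.1, y.2.1) = k then y.2.2 else 0) + pvSumK l k := by
  unfold pvSumK
  simp only [List.foldl_cons]
  by_cases h : (y.1, y.2.1) = k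
  · rw [if_pos h, if_pos (beq_iff_eq.mpr h)]
    simp only [pvSumK_acc k l]; omega
  · rw [if_neg h, if_neg (by simpa using h)]
    simp only [pvSumK_acc k l]; omega

lemma pvFoldAdd (l : List (String × String × Int)) :
    ∀ (a : Int), l.foldl (fun a x => a + x.2.2) a = a + (l.map (fun x => x.2.2)).sum := by
  induction l with
  | nil => intro a; simp
  | cons x xs ih => intro a; simp only [List.foldl_cons, List.map_cons, List.sum_cons, ih]; ring

lemma pvSumZero (c : String × String) (v : Int) (ks : List (String × String)) :
    c ∉ ks → (ks.map (fun k => if c = k then v else 0)).sum = 0 := by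
  induction ks with
  | nil => intro _; simp
  | cons k ks ih =>
    intro h
    simp only [List.mem_cons, not_or] at h
    simp only [List.map_cons, List.sum_cons, if_neg h.1, ih h.2, add_zero]

lemma pvSumSingle (c : String × String) (v : Int) (ks : List (String × String)) :
    ks.Nodup → c ∈ ks → (ks.map (fun k => if c = k then v else 0)).sum = v := by
  induction ks with
  | nil => intro _ h; exact absurd h (List.not_mem_nil)
  | cons k ks ih =>
    intro hnd hc
    rw [List.nodup_cons] at hnd
    rcases List.mem_cons.mp hc with rfl | hc
    · rw [List.map_cons, List.sum_cons, if_pos rfl, pvSumZero c v ks hnd.1, add_zero]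
    · have hne : c ≠ k := fun he => hnd.1 (he ▸ hc)
      simp only [List.map_cons, List.sum_cons, if_neg hne, ih hnd.2 hc, zero_add]

lemma pvSumPartition (l : List (String × String × Int)) :
    ∀ (ks : List (String × String)), ks.Nodup → (∀ y ∈ l, (y.1, y.2.1) ∈ ks) →
      (ks.map (fun k => pvSumK l k)).sum = (l.map (fun x => x.2.2)).sum := by
  induction l with
  | nil => intro ks _ _; simp [pvSumK]
  | cons y l ih =>
    intro ks hnd hcov
    have h1 : ks.map (fun k => pvSumK (y :: l) k)
        = ks.map (fun k => (if (y.1, y.2.1) = k then y.2.2 else 0) + pvSumK l k) := by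
      apply List.map_congr_left; intro k _; exact pvSumK_cons k y l
    rw [h1]
    have h2 := pvSumMapAdd (fun k => if (y.1, y.2.1) = k then y.2.2 else 0) (fun k => pvSumK l k) ks
    rw [h2, pvSumSingle _ _ ks hnd (hcov y List.mem_cons_self),
      ih ks hnd (fun z hz => hcov z (List.mem_cons_of_mem _ hz))]
    simp

-- key characterization of A's temp_dict fold
lemma pvTdChar (l : List (String × String × Int)) :
    ∀ (d : PySem.Dict (String × String) Int), d.keys.Nodup →
      (l.foldl (fun td x =>
        if td.contains (x.1, x.2.1) = false then td.insert (x.1, x.2.1) x.2.2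
        else td.insert (x.1, x.2.1) (td.getD (x.1, x.2.1) 0 + x.2.2)) d).items
      = d.items.map (fun p => (p.1, p.2 + pvSumK l p.1))
        ++ (pvKN l d.keys).map (fun k => (k, pvSumK l k)) := by
  induction l with
  | nil =>
    intro d _
    simp [pvKN, pvSumK]
  | cons x xs ih =>
    intro d hnd
    rw [List.foldl_cons]
    by_cases hc : d.contains (x.1, x.2.1) = false
    · -- fresh key: insert appends
      rw [if_pos hc]
      have hmemk : (x.1, x.2.1) ∉ d.keys := by
        rw [PySem.Dict.contains_eq_decide_mem_keys, decide_eq_false_iff_not] at hc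
        exact hc
      set d' := d.insert (x.1, x.2.1) x.2.2 with hd'
      have hitems : d'.items = d.items ++ [((x.1, x.2.1), x.2.2)] :=
        PySem.Dict.items_insert_of_not_contains d _ hc
      have hkeys : d'.keys = d.keys ++ [(x.1, x.2.1)] := by
        show d'.items.map Prod.fst = _
        rw [hitems, List.map_append]
        rfl
      have hnd' : d'.keys.Nodup := by
        rw [hkeys, List.nodup_append]
        exact ⟨hnd, List.nodup_singleton _, by
          intro a ha b hb
          simp only [List.mem_singleton] at hb
          subst hb; exact fun he => hmemk (he ▸ ha)⟩
      rw [ih d' hnd', hitems, hkeys]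
      have hKN : pvKN (x :: xs) d.keys = (x.1, x.2.1) :: pvKN xs (d.keys ++ [(x.1, x.2.1)]) := by
        rw [pvKN_cons, if_neg hmemk]
      rw [hKN, List.map_append, List.map_cons]
      have e1 : d.items.map (fun p => (p.1, p.2 + pvSumK xs p.1))
          = d.items.map (fun p => (p.1, p.2 + pvSumK (x :: xs) p.1)) := by
        apply List.map_congr_left; intro p hp
        have hpk : p.1 ∈ d.keys := List.mem_map_of_mem hp
        have hne : (x.1, x.2.1) ≠ p.1 := fun he => hmemk (he ▸ hpk)
        rw [pvSumK_cons p.1 x xs, if_neg hne, zero_add]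
      have e2 : ((x.1, x.2.1), x.2.2 + pvSumK xs (x.1, x.2.1))
          = ((x.1, x.2.1), pvSumK (x :: xs) (x.1, x.2.1)) := by
        rw [pvSumK_cons _ x xs, if_pos rfl]
      have e3 : (pvKN xs (d.keys ++ [(x.1, x.2.1)])).map (fun k => (k, pvSumK xs k))
          = (pvKN xs (d.keys ++ [(x.1, x.2.1)])).map (fun k => (k, pvSumK (x :: xs) k)) := by
        apply List.map_congr_left; intro k hk
        have hkn := pvKN_not_mem_seen xs _ k hk
        have hne : (x.1, x.2.1) ≠ k := fun he => hkn (he ▸ (by simp : (x.1, x.2.1) ∈ d.keys ++ [(x.1, x.2.1)]))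
        rw [pvSumK_cons k x xs, if_neg hne, zero_add]
      rw [e1, e3]
      simp [e2]
    · -- existing key: insert overwrites in place
      rw [if_neg hc]
      have hct : d.contains (x.1, x.2.1) = true := by
        cases h : d.contains (x.1, x.2.1)
        · exact absurd h hc
        · rfl
      have hmemk : (x.1, x.2.1) ∈ d.keys := (PySem.Dict.contains_iff_mem_keys d _).mp hct
      set d' := d.insert (x.1, x.2.1) (d.getD (x.1, x.2.1) 0 + x.2.2) with hd'
      have hitems : d'.items
          = d.items.map (fun p => (p.1, p.2 + if p.1 = (x.1, x.2.1) then x.2.2 else 0)) := by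
        rw [PySem.Dict.items_insert_of_contains d _ hct]
        apply List.map_congr_left
        intro p hp
        by_cases hpk : p.1 = (x.1, x.2.1)
        · have hmem : ((x.1, x.2.1), p.2) ∈ d.items := by
            have : p = ((x.1, x.2.1), p.2) := by
              cases p; simp at hpk ⊢; exact hpk
            exact this ▸ hp
          have hgd : d.getD (x.1, x.2.1) 0 = p.2 := PySem.Dict.getD_of_mem_items d hmem hnd 0
          rw [if_pos (beq_iff_eq.mpr hpk), if_pos hpk, hgd]
          cases p; simp at hpk ⊢; exact hpk.symm ▸ rfl
        · rw [if_neg (by simpa using hpk), if_neg hpk, add_zero]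
      have hkeys : d'.keys = d.keys := by
        show d'.items.map Prod.fst = d.items.map Prod.fst
        rw [hitems, List.map_map]; rfl
      have hnd' : d'.keys.Nodup := by rw [hkeys]; exact hnd
      rw [ih d' hnd', hitems, hkeys, List.map_map]
      have hKN : pvKN (x :: xs) d.keys = pvKN xs d.keys := by
        rw [pvKN_cons, if_pos hmemk]
      rw [hKN]
      congr 1
      · apply List.map_congr_left
        intro p hp
        show (p.1, p.2 + (if p.1 = (x.1, x.2.1) then x.2.2 else 0) + pvSumK xs p.1)
          = (p.1, p.2 + pvSumK (x :: xs) p.1)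
        rw [pvSumK_cons p.1 x xs]
        have : (if (x.1, x.2.1) = p.1 then x.2.2 else 0) = (if p.1 = (x.1, x.2.1) then x.2.2 else 0) := by
          by_cases h : p.1 = (x.1, x.2.1)
          · rw [if_pos h, if_pos h.symm]
          · rw [if_neg h, if_neg (fun he => h he.symm)]
        rw [this]; congr 1; ring
      · apply List.map_congr_left
        intro k hk
        have hkn := pvKN_not_mem_seen xs _ k hk
        have hne : (x.1, x.2.1) ≠ k := fun he => hkn (he ▸ hmemk)
        rw [pvSumK_cons k x xs, if_neg hne, zero_add]

-- key characterization of B's merged fold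
lemma pvMergedAux (L : List (String × String × Int)) (l : List (String × String × Int)) :
    ∀ (ks : List (String × String)),
      l.foldl (fun m x =>
        if m.all (fun y => !((y.1, y.2.1) == (x.1, x.2.1))) then
          m ++ [(x.1, x.2.1, pvSumK L (x.1, x.2.1))]
        else m) (ks.map (fun k => (k.1, k.2, pvSumK L k)))
      = (ks ++ pvKN l ks).map (fun k => (k.1, k.2, pvSumK L k)) := by
  induction l with
  | nil => intro ks; simp [pvKN]
  | cons x xs ih =>
    intro ks
    rw [List.foldl_cons]
    have hall : ((ks.map (fun k => (k.1, k.2, pvSumK L k))).all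
        (fun y => !((y.1, y.2.1) == (x.1, x.2.1)))) = ks.all (fun k => !(k == (x.1, x.2.1))) := by
      rw [List.all_map]
      have hfe : ((fun (y : String × String × Int) => !((y.1, y.2.1) == (x.1, x.2.1)))
          ∘ (fun (k : String × String) => (k.1, k.2, pvSumK L k)))
          = (fun (k : String × String) => !(k == (x.1, x.2.1))) := by
        funext k; simp
      rw [hfe]
    by_cases hm : (x.1, x.2.1) ∈ ks
    · have hfalse : ks.all (fun k => !(k == (x.1, x.2.1))) = false := by
        rw [List.all_eq_false]
        exact ⟨(x.1, x.2.1), hm, by simp⟩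
      rw [hall, hfalse]
      simp only [Bool.false_eq_true, if_false]
      have hKN : pvKN (x :: xs) ks = pvKN xs ks := by rw [pvKN_cons, if_pos hm]
      rw [hKN]; exact ih ks
    · have htrue : ks.all (fun k => !(k == (x.1, x.2.1))) = true := by
        rw [List.all_eq_true]
        intro k hk
        simp only [Bool.not_eq_eq_eq_not, Bool.not_true, beq_eq_false_iff_ne, ne_eq]
        exact fun he => hm (he ▸ hk)
      rw [hall, htrue, if_pos rfl]
      have happ : (ks.map (fun k => (k.1, k.2, pvSumK L k))) ++ [(x.1, x.2.1, pvSumK L (x.1, x.2.1))]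
          = (ks ++ [(x.1, x.2.1)]).map (fun k => (k.1, k.2, pvSumK L k)) := by
        rw [List.map_append]; rfl
      rw [happ, ih (ks ++ [(x.1, x.2.1)])]
      have hKN : pvKN (x :: xs) ks = (x.1, x.2.1) :: pvKN xs (ks ++ [(x.1, x.2.1)]) := by
        rw [pvKN_cons, if_neg hm]
      rw [hKN]
      simp [List.append_assoc]

-- both per-key merged lists equal the canonical one
lemma pvTdItems (l : List (String × String × Int)) :
    (pvTd l).items = (pvKN l []).map (fun k => (k, pvSumK l k)) := by
  have h := pvTdChar l PySem.Dict.empty (by simp)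
  simpa [pvTd] using h

lemma pvMergedEq (l : List (String × String × Int)) :
    pvMerged l = (pvKN l []).map (fun k => (k.1, k.2, pvSumK l k)) := by
  have h := pvMergedAux l l ([] : List (String × String))
  simpa [pvMerged] using h

lemma pvFlatTd (l : List (String × String × Int)) :
    (pvTd l).items.map pvFlat = pvMerged l := by
  rw [pvTdItems, pvMergedEq, List.map_map]
  rfl

lemma pvTotalMerged (l : List (String × String × Int)) :
    pvTotal (pvMerged l) = pvTotal l := by
  rw [pvMergedEq]
  unfold pvTotal
  rw [pvFoldAdd, pvFoldAdd, List.map_map]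
  have : ((pvKN l []).map (fun k => ((fun x : String × String × Int => x.2.2) ∘ (fun k : String × String => (k.1, k.2, pvSumK l k))) k)).sum
      = ((pvKN l []).map (fun k => pvSumK l k)).sum := rfl
  rw [this, pvSumPartition l (pvKN l []) (pvKN_nodup l []) (fun y hy => by simpa using pvKN_covers l [] y hy)]

-- ===== outer folds =====
-- appending to the last entry of merge_dict: the tail loop
lemma pvA2 (l : List ((String × String) × Int)) :
    ∀ (pre : List (String × List (String × String × Int))) (key : String)
      (acc : List (String × String × Int)),
      (∀ p ∈ pre, p.1 ≠ key) → (pre.map Prod.fst).Nodup →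
      (l.foldl (fun md p => md.modify key [] (· ++ [pvFlat p]))
        (PySem.Dict.mk (pre ++ [(key, acc)]))).items
        = pre ++ [(key, acc ++ l.map pvFlat)] := by
  induction l with
  | nil => intro pre key acc h1 h2; simp
  | cons p rest ih =>
    intro pre key acc h1 h2
    have hmem : (key, acc) ∈ (PySem.Dict.mk (pre ++ [(key, acc)])).items := by simp
    have hnd : (PySem.Dict.mk (pre ++ [(key, acc)])).keys.Nodup := by
      show ((pre ++ [(key, acc)]).map Prod.fst).Nodup
      simp only [List.map_append, List.map_cons, List.map_nil]
      rw [List.nodup_append]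
      refine ⟨h2, List.nodup_singleton _, ?_⟩
      intro a ha b hb
      simp only [List.mem_singleton] at hb
      rcases List.mem_map.mp ha with ⟨q, hq, rfl⟩
      exact hb ▸ h1 q hq
    have hc : (PySem.Dict.mk (pre ++ [(key, acc)])).contains key = true := by
      rw [PySem.Dict.contains_iff_mem_keys]
      show key ∈ (pre ++ [(key, acc)]).map Prod.fst
      simp
    have hgd : (PySem.Dict.mk (pre ++ [(key, acc)])).getD key [] = acc :=
      PySem.Dict.getD_of_mem_items _ hmem hnd []
    have hstep : (PySem.Dict.mk (pre ++ [(key, acc)])).modify key [] (· ++ [pvFlat p])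
        = PySem.Dict.mk (pre ++ [(key, acc ++ [pvFlat p])]) := by
      apply PySem.Dict.ext
      show ((PySem.Dict.mk (pre ++ [(key, acc)])).insert key
        ((PySem.Dict.mk (pre ++ [(key, acc)])).getD key [] ++ [pvFlat p])).items = _
      rw [hgd, PySem.Dict.items_insert_of_contains _ _ hc]
      show (pre ++ [(key, acc)]).map _ = _
      rw [List.map_append]
      congr 1
      · conv_rhs => rw [← List.map_id pre]
        apply List.map_congr_left
        intro q hq
        rw [if_neg, id]
        simp only [beq_iff_eq]
        exact h1 q hq
      · simp
    rw [List.foldl_cons, hstep, ih pre key (acc ++ [pvFlat p]) h1 h2]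
    simp

-- one outer iteration of A: appending temp_dict's items under a fresh key
lemma pvA3 (l : List ((String × String) × Int)) (d : PySem.Dict String (List (String × String × Int)))
    (key : String) (hnd : d.keys.Nodup) (hc : d.contains key = false) :
    (l.foldl (fun md p => md.modify key [] (· ++ [pvFlat p])) d).items
      = d.items ++ (if l.isEmpty then [] else [(key, l.map pvFlat)]) := by
  match l with
  | [] => simp
  | p :: rest =>
    have hfresh : ∀ q ∈ d.items, q.1 ≠ key := by
      intro q hq he
      have : d.contains key = true := by
        rw [PySem.Dict.contains_iff_mem_keys]
        exact he ▸ (List.mem_map_of_mem hq : q.1 ∈ d.items.map Prod.fst)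
      rw [this] at hc; exact Bool.noConfusion hc
    have hstep : d.modify key [] (· ++ [pvFlat p])
        = PySem.Dict.mk (d.items ++ [(key, [pvFlat p])]) := by
      apply PySem.Dict.ext
      show (d.insert key (d.getD key [] ++ [pvFlat p])).items = _
      rw [PySem.Dict.getD_of_not_contains d [] hc,
        PySem.Dict.items_insert_of_not_contains d _ hc]
      simp
    rw [List.foldl_cons, hstep, pvA2 rest d.items key [pvFlat p] hfresh hnd,
      if_neg (by simp)]
    simp

-- the whole merge_dict-building loop of A
lemma pvA4 (ws : List (String × List (String × String × Int))) :
    ∀ (d : PySem.Dict String (List (String × String × Int))),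
      d.keys.Nodup → (∀ kv ∈ ws, d.contains kv.1 = false) → (ws.map Prod.fst).Nodup →
      (ws.foldl (fun md kv =>
          ((kv.2.foldl (fun td x =>
              if td.contains (x.1, x.2.1) = false then td.insert (x.1, x.2.1) x.2.2
              else td.insert (x.1, x.2.1) (td.getD (x.1, x.2.1) 0 + x.2.2)) PySem.Dict.empty).items.foldl
            (fun md2 p => md2.modify kv.1 [] (· ++ [(p.1.1, p.1.2, p.2)])) md)) d).items
        = d.items ++ ws.filterMap pvEntry := by
  induction ws with
  | nil => intro d _ _ _; simp
  | cons kv rest ih =>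
    intro d hnd hfresh hnodup
    rw [List.foldl_cons]
    have hM : kv.2.foldl (fun td x =>
        if td.contains (x.1, x.2.1) = false then td.insert (x.1, x.2.1) x.2.2
        else td.insert (x.1, x.2.1) (td.getD (x.1, x.2.1) 0 + x.2.2)) PySem.Dict.empty
        = pvTd kv.2 := rfl
    rw [hM]
    have h3 := pvA3 (pvTd kv.2).items d kv.1 hnd (hfresh kv (List.mem_cons_self))
    set d1 := (pvTd kv.2).items.foldl (fun md2 p => md2.modify kv.1 [] (· ++ [(p.1.1, p.1.2, p.2)])) d with hd1
    have h1 : d1.items = d.items ++ (if (pvTd kv.2).items.isEmpty then [] else [(kv.1, (pvTd kv.2).items.map pvFlat)]) := h3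
    have hkeys : d1.keys = d.keys ++ (if (pvTd kv.2).items.isEmpty then [] else [kv.1]) := by
      show d1.items.map Prod.fst = _
      rw [h1, List.map_append]
      congr 1
      split <;> simp
    have hnd1 : d1.keys.Nodup := by
      rw [hkeys]
      rcases ite_eq_or_eq ((pvTd kv.2).items.isEmpty) ([] : List String) [kv.1] with h | h <;> rw [h]
      · simpa using hnd
      · rw [List.nodup_append]
        refine ⟨hnd, List.nodup_singleton _, ?_⟩
        intro a ha b hb
        simp only [List.mem_singleton] at hb
        subst hb
        intro he
        have hca : d.contains kv.1 = true :=
          (PySem.Dict.contains_iff_mem_keys d kv.1).mpr (he ▸ ha)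
        rw [hfresh kv (List.mem_cons_self)] at hca
        exact Bool.noConfusion hca
    have hfresh1 : ∀ kv' ∈ rest, d1.contains kv'.1 = false := by
      intro kv' hkv'
      rw [PySem.Dict.contains_eq_decide_mem_keys, decide_eq_false_iff_not, hkeys]
      intro hmem
      rcases List.mem_append.mp hmem with h | h
      · have : d.contains kv'.1 = true := (PySem.Dict.contains_iff_mem_keys d kv'.1).mpr h
        rw [hfresh kv' (List.mem_cons_of_mem _ hkv')] at this
        exact Bool.noConfusion this
      · have he : kv'.1 = kv.1 := by
          rcases ite_eq_or_eq ((pvTd kv.2).items.isEmpty) ([] : List String) [kv.1] with hh | hh <;> rw [hh] at h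
          · exact absurd h (List.not_mem_nil)
          · simpa using h
        rw [List.map_cons, List.nodup_cons] at hnodup
        exact hnodup.1 (he ▸ List.mem_map_of_mem hkv')
    rw [ih d1 hnd1 hfresh1 (by rw [List.map_cons, List.nodup_cons] at hnodup; exact hnodup.2), h1, List.filterMap_cons]
    by_cases hE : (pvTd kv.2).items.isEmpty
    · simp [pvEntry, hE]
    · simp [pvEntry, hE, List.append_assoc]

-- B's single fused loop
lemma pvB (ws : List (String × List (String × String × Int))) :
    ∀ (d : PySem.Dict (String × Int) (List (String × String × Int))),
      (∀ kv ∈ ws, ∀ k ∈ d.keys, (k : String × Int).1 ≠ kv.1) → (ws.map Prod.fst).Nodup →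
      (ws.foldl (fun fd kv =>
        if ((kv.2.foldl (fun m x =>
              if m.all (fun y => !((y.1, y.2.1) == (x.1, x.2.1))) then
                m ++ [(x.1, x.2.1, kv.2.foldl (fun a y => if (y.1, y.2.1) == (x.1, x.2.1) then a + y.2.2 else a) 0)]
              else m) []).isEmpty) = false then
          fd.insert (kv.1, kv.2.foldl (fun a y => a + y.2.2) 0)
            (kv.2.foldl (fun m x =>
              if m.all (fun y => !((y.1, y.2.1) == (x.1, x.2.1))) then
                m ++ [(x.1, x.2.1, kv.2.foldl (fun a y => if (y.1, y.2.1) == (x.1, x.2.1) then a + y.2.2 else a) 0)]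
              else m) [])
        else fd) d).items
      = d.items ++ ws.filterMap pvEntryB := by
  induction ws with
  | nil => intro d _ _; simp
  | cons kv rest ih =>
    intro d hkeys hnodup
    rw [List.foldl_cons]
    have hM : kv.2.foldl (fun m x =>
        if m.all (fun y => !((y.1, y.2.1) == (x.1, x.2.1))) then
          m ++ [(x.1, x.2.1, kv.2.foldl (fun a y => if (y.1, y.2.1) == (x.1, x.2.1) then a + y.2.2 else a) 0)]
        else m) [] = pvMerged kv.2 := rfl
    rw [hM]
    rw [List.map_cons, List.nodup_cons] at hnodup
    by_cases hE : (pvMerged kv.2).isEmpty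
    · rw [if_neg (by simp [hE])]
      rw [ih d (fun kv' h' => hkeys kv' (List.mem_cons_of_mem _ h')) hnodup.2,
        List.filterMap_cons]
      simp [pvEntryB, hE]
    · rw [if_pos (by simp [hE])]
      have hTot : kv.2.foldl (fun a y => a + y.2.2) 0 = pvTotal kv.2 := rfl
      rw [hTot]
      have hc : d.contains (kv.1, pvTotal kv.2) = false := by
        rw [PySem.Dict.contains_eq_decide_mem_keys, decide_eq_false_iff_not]
        intro hmem
        exact hkeys kv (List.mem_cons_self) _ hmem rfl
      set d1 := d.insert (kv.1, pvTotal kv.2) (pvMerged kv.2) with hd1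
      have h1 : d1.items = d.items ++ [((kv.1, pvTotal kv.2), pvMerged kv.2)] :=
        PySem.Dict.items_insert_of_not_contains d _ hc
      have hk1 : ∀ kv' ∈ rest, ∀ k ∈ d1.keys, (k : String × Int).1 ≠ kv'.1 := by
        intro kv' h' k hk
        have : k ∈ d1.items.map Prod.fst := hk
        rw [h1, List.map_append] at this
        rcases List.mem_append.mp this with h | h
        · exact hkeys kv' (List.mem_cons_of_mem _ h') k h
        · simp only [List.map_cons, List.map_nil, List.mem_singleton] at h
          subst h
          intro he
          exact hnodup.1 (he ▸ List.mem_map_of_mem h')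
      rw [ih d1 hk1 hnodup.2, h1, List.filterMap_cons]
      have hEB : pvEntryB kv = some ((kv.1, pvTotal kv.2), pvMerged kv.2) := by
        unfold pvEntryB
        rw [if_pos (by simp [hE])]
      rw [hEB]
      simp [List.append_assoc]

-- keys of the merged entries form a sublist of temp_wd's keys
lemma pvKeysSub (l : List (String × List (String × String × Int))) :
    ((l.filterMap pvEntry).map Prod.fst).Sublist (l.map Prod.fst) := by
  induction l with
  | nil => simp
  | cons kv rest ih =>
    rw [List.filterMap_cons, List.map_cons]
    by_cases hE : (pvTd kv.2).items.isEmpty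
    · rw [show pvEntry kv = none from by unfold pvEntry; rw [if_pos hE]]
      exact ih.cons _
    · rw [show pvEntry kv = some (kv.1, (pvTd kv.2).items.map pvFlat) from by
        unfold pvEntry; rw [if_neg hE]]
      exact List.Sublist.cons₂ _ ih

theorem pvMain (temp_wd : List (String × List (String × String × Int)))
    (hpre : (temp_wd.map Prod.fst).Nodup) :
    zh_word_merger temp_wd = zh_word_merger_alt temp_wd := by
  simp only [zh_word_merger, zh_word_merger_alt]
  have hA : (temp_wd.foldl (fun md kv =>
      ((kv.2.foldl (fun td x =>
          if td.contains (x.1, x.2.1) = false then td.insert (x.1, x.2.1) x.2.2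
          else td.insert (x.1, x.2.1) (td.getD (x.1, x.2.1) 0 + x.2.2)) PySem.Dict.empty).items.foldl
        (fun md2 p => md2.modify kv.1 [] (· ++ [(p.1.1, p.1.2, p.2)])) md)) PySem.Dict.empty).items
      = temp_wd.filterMap pvEntry := by
    have h := pvA4 temp_wd PySem.Dict.empty (by simp) (fun kv _ => by simp) hpre
    simpa using h
  rw [hA]
  have hndA : ((temp_wd.filterMap pvEntry).map Prod.fst).Nodup :=
    hpre.sublist (pvKeysSub temp_wd)
  have hndk : ((temp_wd.filterMap pvEntry).map
      (fun p => (p.1, p.2.foldl (fun a x => a + x.2.2) 0))).Nodup := by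
    apply List.Nodup.of_map Prod.fst
    rw [List.map_map]
    exact hndA
  rw [PySem.Dict.items_foldl_insert_fresh (temp_wd.filterMap pvEntry)
    (fun p => (p.1, p.2.foldl (fun a x => a + x.2.2) 0)) (fun p => p.2)
    PySem.Dict.empty (fun a _ => by simp) hndk]
  have hB := pvB temp_wd PySem.Dict.empty (by simp) hpre
  rw [hB]
  have hpt : ∀ kv : String × List (String × String × Int),
      Option.map (fun p : (String × Int) × List (String × String × Int) => (p.1.1, p.1.2, p.2))
        (Option.map (fun a : String × List (String × String × Int) =>
          ((a.1, List.foldl (fun a x => a + x.2.2) 0 a.2), a.2)) (pvEntry kv))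
        = (pvEntryB kv).map (fun p => (p.1.1, p.1.2, p.2)) := by
    intro kv
    have hEmp : ((pvTd kv.2).items.map pvFlat).isEmpty = (pvMerged kv.2).isEmpty := by
      rw [pvFlatTd]
    by_cases hE : (pvMerged kv.2).isEmpty
    · have hE' : (pvTd kv.2).items.isEmpty := by
        have := hEmp; rw [hE] at this; simpa using this
      simp [pvEntry, pvEntryB, hE, hE']
    · have hE' : ¬ (pvTd kv.2).items.isEmpty := by
        intro h
        have : ((pvTd kv.2).items.map pvFlat).isEmpty := by simpa using h
        rw [hEmp] at this; exact hE this
      simp [pvEntry, pvEntryB, hE, hE', pvFlatTd]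
      exact pvTotalMerged kv.2
  simp only [show (PySem.Dict.empty : PySem.Dict (String × Int) (List (String × String × Int))).items = [] from rfl,
    List.nil_append, List.map_filterMap]
  exact congrArg (fun f => List.filterMap f temp_wd) (funext hpt)

-- ===== VERDICT (by name: the statement is the Claim_ definition above) =====
theorem zh_word_merger_spec : Claim_equal_zh_word_merger := by
  intro temp_wd _ hpre
  exact pvMain temp_wd hpre
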